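-- pv_equiv track=rewrite | github.com/Tony-sama/pylfit | tests/examples/sequences_learning/sequence_properties.py | coexistence
-- ===== SOURCE A (Python) =====
-- def coexistence(events, sequence):
--     features = []
--     values = []
--     for i, ei in enumerate(sorted(events)):
--         for ej in sorted(events)[i+1:]:
--             features.append("coexistence_"+str(ei)+"_"+str(ej))
--             values.append((ei in sequence and ej in sequence) or (ei not in sequence and ej not in sequence))
--     return features, values
-- ===== SOURCE B (Python) =====
-- def coexistence(events, sequence):
--     # One reversed pass: maintain the already-processed suffix (and its membership
--     # flags) and emit each head's row against that suffix; rows are assembled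
--     # back-to-front at the end.
--     ordered = sorted(events)
--     tail = []
--     flags = []
--     feat_rows = []
--     val_rows = []
--     for head in reversed(ordered):
--         hp = head in sequence
--         feat_rows.append(["coexistence_" + str(head) + "_" + str(e) for e in tail])
--         val_rows.append([hp == f for f in flags])
--         tail = [head] + tail
--         flags = [hp] + flags
--     features = [x for row in reversed(feat_rows) for x in row]
--     values = [v for row in reversed(val_rows) for v in row]
--     return features, values
-- ===== Notes on version B (the rewrite author's own statement) =====
-- stated objective: faster
-- what changed: B replaces A's nested index loops (which re-sort events and re-scan the sequence for every pair) by a single reversed pass over the sorted list that carries the already-processed suffix and its membership flags as accumulators, emitting one row per head and assembling the output back-to-front from the reversed rows.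
import Mathlib
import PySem

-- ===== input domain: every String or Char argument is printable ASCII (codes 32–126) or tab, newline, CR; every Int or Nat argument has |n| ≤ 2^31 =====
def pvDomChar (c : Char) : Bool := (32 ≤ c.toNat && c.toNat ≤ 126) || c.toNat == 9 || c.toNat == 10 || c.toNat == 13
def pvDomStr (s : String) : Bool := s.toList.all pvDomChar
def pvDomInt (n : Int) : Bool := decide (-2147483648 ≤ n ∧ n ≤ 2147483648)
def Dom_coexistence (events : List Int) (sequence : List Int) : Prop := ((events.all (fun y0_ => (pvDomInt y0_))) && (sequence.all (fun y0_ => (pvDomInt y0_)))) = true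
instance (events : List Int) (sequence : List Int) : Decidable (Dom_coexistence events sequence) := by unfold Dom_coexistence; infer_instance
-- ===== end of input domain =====

-- B makes one reversed pass over the sorted list, keeping the processed suffix and its
-- membership flags, and assembles the rows back-to-front; A re-sorts the events and
-- re-scans the sequence inside every inner iteration. Objective: faster.

-- ===== PORT A =====
def coexistence (events : List Int) (sequence : List Int) : List String × List Bool :=
  (PySem.List.enumerate (PySem.List.sorted events (fun x => x) false)).foldl
    (fun acc p =>
      (PySem.List.slice (PySem.List.sorted events (fun x => x) false) (some (p.1 + 1)) none).foldl
        (fun acc2 ej =>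
          (acc2.1 ++ ["coexistence_" ++ PySem.Int.toStr p.2 ++ "_" ++ PySem.Int.toStr ej],
           acc2.2 ++ [(sequence.contains p.2 && sequence.contains ej) ||
                      (!sequence.contains p.2 && !sequence.contains ej)]))
        acc)
    ([], [])

-- ===== PORT B =====
-- the loop body of Source B's single reversed pass (state: tail, flags, feat_rows, val_rows)
def pvStep (sequence : List Int)
    (st : List Int × List Bool × List (List String) × List (List Bool)) (head : Int) :
    List Int × List Bool × List (List String) × List (List Bool) :=
  let hp := sequence.contains head
  (head :: st.1, hp :: st.2.1,
   st.2.2.1 ++ [st.1.map (fun e => "coexistence_" ++ PySem.Int.toStr head ++ "_" ++ PySem.Int.toStr e)],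
   st.2.2.2 ++ [st.2.1.map (fun f => hp == f)])

def coexistence_alt (events : List Int) (sequence : List Int) : List String × List Bool :=
  let ordered := PySem.List.sorted events (fun x => x) false
  let st := ordered.reverse.foldl (pvStep sequence) ([], [], [], [])
  (st.2.2.1.reverse.flatten, st.2.2.2.reverse.flatten)

-- ===== PRECONDITION & SPEC =====
def Spec_coexistence (events : List Int) (sequence : List Int) (out : List String × List Bool) : Prop := out = coexistence_alt events sequence
instance (events : List Int) (sequence : List Int) (out : List String × List Bool) : Decidable (Spec_coexistence events sequence out) := by unfold Spec_coexistence; infer_instance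

-- ===== CLAIM (what is proved, stated in full; the proofs are below) =====
def Claim_equal_coexistence : Prop := ∀ (events : List Int) (sequence : List Int), Dom_coexistence events sequence → Spec_coexistence events sequence (coexistence events sequence)

-- ===== LEMMAS AND PROOFS =====

-- structural canon: for each head, a row built from the elements after it
def pvCanonG {β : Type} (g : Int → Int → β) : List Int → List β
  | [] => []
  | h :: t => t.map (g h) ++ pvCanonG g t

def pvName (x y : Int) : String :=
  "coexistence_" ++ PySem.Int.toStr x ++ "_" ++ PySem.Int.toStr y

lemma pvBool_eq (a b : Bool) : ((a && b) || (!a && !b)) = (a == b) := by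
  cases a <;> cases b <;> rfl

lemma pvFlatMap_congr {α β : Type} (l : List α) (f g : α → List β) (h : ∀ x ∈ l, f x = g x) :
    l.flatMap f = l.flatMap g := by
  simp only [List.flatMap_def]
  rw [List.map_congr_left h]

-- the enumerate/drop flatMap of A's untangled loops is the structural canon
lemma pvGen {β : Type} (g : Int → Int → β) :
    ∀ (t : List Int) (k : Int), 0 ≤ k →
      (PySem.List.enumerate t k).flatMap
        (fun p => (t.drop (p.1 + 1 - k).toNat).map (g p.2)) = pvCanonG g t := by
  intro t
  induction t with
  | nil => intro k hk; simp [PySem.List.enumerate_nil, pvCanonG]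
  | cons h t ih =>
    intro k hk
    rw [PySem.List.enumerate_cons, List.flatMap_cons]
    have h1 : ((k + 1 - k).toNat) = 1 := by omega
    simp only [h1, List.drop_one, List.tail_cons]
    have h2 : (PySem.List.enumerate t (k + 1)).flatMap
        (fun p => ((h :: t).drop (p.1 + 1 - k).toNat).map (g p.2)) =
        (PySem.List.enumerate t (k + 1)).flatMap
        (fun p => (t.drop (p.1 + 1 - (k + 1)).toNat).map (g p.2)) := by
      apply pvFlatMap_congr
      intro p hp
      obtain ⟨j, hj, rfl⟩ := (PySem.List.mem_enumerate_iff _ _ _).1 hp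
      have h3 : ((k + 1 + (j : Int) + 1 - k).toNat) = ((k + 1 + (j : Int) + 1 - (k + 1)).toNat) + 1 := by
        omega
      rw [h3, List.drop_succ_cons]
    rw [h2, ih (k + 1) (by omega), pvCanonG]

lemma pvA_eq_canon (events sequence : List Int) :
    coexistence events sequence =
      (pvCanonG pvName (PySem.List.sorted events (fun x => x) false),
       pvCanonG (fun h e => sequence.contains h == sequence.contains e)
         (PySem.List.sorted events (fun x => x) false)) := by
  unfold coexistence
  have hname : ∀ x y : Int, "coexistence_" ++ PySem.Int.toStr x ++ "_" ++ PySem.Int.toStr y = pvName x y := fun _ _ => rfl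
  simp only [hname]
  set s := PySem.List.sorted events (fun x => x) false with hs
  rw [PySem.List.foldl_congr_mem _ _
      (fun (acc : List String × List Bool) (p : Int × Int) =>
        (acc.1 ++ (PySem.List.slice s (some (p.1 + 1)) none).map (fun ej => pvName p.2 ej),
         acc.2 ++ (PySem.List.slice s (some (p.1 + 1)) none).map (fun ej =>
           (sequence.contains p.2 && sequence.contains ej) ||
           (!sequence.contains p.2 && !sequence.contains ej)))) _
      (by
        intro acc p _
        rw [PySem.List.foldl_prod_mk (f := fun a ej => a ++ [pvName p.2 ej])
            (g := fun a ej => a ++ [(sequence.contains p.2 && sequence.contains ej) ||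
              (!sequence.contains p.2 && !sequence.contains ej)]) _ acc.1 acc.2]
        rw [PySem.List.foldl_append_singleton_eq_map, PySem.List.foldl_append_singleton_eq_map])]
  rw [PySem.List.foldl_prod_mk
      (fun (a : List String) (p : Int × Int) => a ++ (PySem.List.slice s (some (p.1 + 1)) none).map (fun ej => pvName p.2 ej))
      (fun (a : List Bool) (p : Int × Int) => a ++ (PySem.List.slice s (some (p.1 + 1)) none).map (fun ej =>
        (sequence.contains p.2 && sequence.contains ej) ||
        (!sequence.contains p.2 && !sequence.contains ej)))
      (PySem.List.enumerate s) [] []]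
  rw [PySem.List.foldl_append_eq_flatMap, PySem.List.foldl_append_eq_flatMap, List.nil_append, List.nil_append]
  have hmem : ∀ p ∈ PySem.List.enumerate s 0, (0:Int) ≤ p.1 ∧
      PySem.List.slice s (some (p.1 + 1)) none = s.drop (p.1 + 1 - 0).toNat := by
    intro p hp
    obtain ⟨j, hj, rfl⟩ := (PySem.List.mem_enumerate_iff _ _ _).1 hp
    refine ⟨by positivity, ?_⟩
    rw [PySem.List.slice_from s (by positivity : (0:Int) ≤ 0 + (j:Int) + 1)]
    norm_num
  refine Prod.ext ?_ ?_
  · show (PySem.List.enumerate s 0).flatMap _ = _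
    rw [pvFlatMap_congr _ _ (fun p => (s.drop (p.1 + 1 - 0).toNat).map (fun ej => pvName p.2 ej))
        (fun p hp => by rw [(hmem p hp).2])]
    exact pvGen pvName s 0 le_rfl
  · show (PySem.List.enumerate s 0).flatMap _ = _
    rw [pvFlatMap_congr _ _
        (fun p => (s.drop (p.1 + 1 - 0).toNat).map (fun ej => sequence.contains p.2 == sequence.contains ej))
        (fun p hp => by rw [(hmem p hp).2]; simp only [pvBool_eq])]
    exact pvGen (fun h e => sequence.contains h == sequence.contains e) s 0 le_rfl

-- invariant of B's reversed pass: after folding s.reverse the state holds s, its flags,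
-- and rows whose reversed flattening is the canon
lemma pvB_inv (sequence : List Int) (s : List Int) :
    (s.reverse.foldl (pvStep sequence) ([], [], [], [])).1 = s ∧
    (s.reverse.foldl (pvStep sequence) ([], [], [], [])).2.1 = s.map (fun e => sequence.contains e) ∧
    (s.reverse.foldl (pvStep sequence) ([], [], [], [])).2.2.1.reverse.flatten = pvCanonG pvName s ∧
    (s.reverse.foldl (pvStep sequence) ([], [], [], [])).2.2.2.reverse.flatten =
      pvCanonG (fun h e => sequence.contains h == sequence.contains e) s := by
  induction s with
  | nil => simp [pvCanonG]
  | cons h t ih =>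
    obtain ⟨i1, i2, i3, i4⟩ := ih
    have hrev : (h :: t).reverse = t.reverse ++ [h] := by simp
    rw [hrev, List.foldl_append]
    set st := t.reverse.foldl (pvStep sequence) ([], [], [], []) with hst
    simp only [List.foldl_cons, List.foldl_nil]
    unfold pvStep
    refine ⟨by simp [i1], by simp [i2], ?_, ?_⟩
    · simp only [List.reverse_append, List.reverse_cons, List.reverse_nil, List.nil_append,
        List.cons_append, List.flatten_cons]
      rw [i3, i1, pvCanonG]
      rfl
    · simp only [List.reverse_append, List.reverse_cons, List.reverse_nil, List.nil_append,
        List.cons_append, List.flatten_cons]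
      rw [i4, i2, pvCanonG]
      congr 1
      rw [List.map_map]
      apply List.map_congr_left
      intro e _
      simp [Bool.beq_comm]

lemma pvB_eq_canon (events sequence : List Int) :
    coexistence_alt events sequence =
      (pvCanonG pvName (PySem.List.sorted events (fun x => x) false),
       pvCanonG (fun h e => sequence.contains h == sequence.contains e)
         (PySem.List.sorted events (fun x => x) false)) := by
  unfold coexistence_alt
  obtain ⟨_, _, i3, i4⟩ := pvB_inv sequence (PySem.List.sorted events (fun x => x) false)
  exact Prod.ext i3 i4

-- ===== VERDICT (by name: the statement is the Claim_ definition above) =====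
theorem coexistence_spec : Claim_equal_coexistence := by
  intro events sequence _
  unfold Spec_coexistence
  rw [pvA_eq_canon, pvB_eq_canon]
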